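-- pv_equiv track=rewrite | github.com/to-be-pass/python-coding-test | src/youngrongoh/ch_08/solution_024.py | solution
-- ===== SOURCE A (Python) =====
-- def solution(id_list, report, k):
--     reporting_user = {}
--
--     for line in report:
--         uid, reported_id = line.split()
--         if uid not in reporting_user:
--             reporting_user[uid] = set([reported_id])
--         else:
--             reporting_user[uid].add(reported_id)
--
--     reported_count = {}
--     for _, reported_users in reporting_user.items():
--         for reported_id in reported_users:
--             if reported_id not in reported_count:
--                 reported_count[reported_id] = 1
--             else:
--                 reported_count[reported_id] += 1
--
--     answer = [0] * len(id_list)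
--     for i in range(len(id_list)):
--         uid = id_list[i]
--         if uid not in reporting_user:
--             continue
--         for reported_id in reporting_user[uid]:
--             if reported_id in reported_count and reported_count[reported_id] >= k:
--                 answer[i] += 1
--     return answer
-- ===== SOURCE B (Python) =====
-- def solution(id_list, report, k):
--     # One dedup pass over report into a set of (reporter, reported) pairs,
--     # then a per-reported count, then a comprehension over id_list.
--     pairs = set()
--     for line in report:
--         uid, reported_id = line.split()
--         pairs.add((uid, reported_id))
--     cnt = {}
--     for _, reported_id in pairs:
--         cnt[reported_id] = cnt.get(reported_id, 0) + 1
--     return [sum(1 for u, r in pairs if u == uid and cnt.get(r, 0) >= k)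
--             for uid in id_list]
-- ===== Notes on version B (the rewrite author's own statement) =====
-- stated objective: alternative
-- what changed: Replaces A's dict-of-sets keyed by reporter plus a flattening count pass with a single deduplicated set of (reporter, reported) pairs, a flat count dict over it, and a per-user comprehension counting qualifying pairs.
import Mathlib
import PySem

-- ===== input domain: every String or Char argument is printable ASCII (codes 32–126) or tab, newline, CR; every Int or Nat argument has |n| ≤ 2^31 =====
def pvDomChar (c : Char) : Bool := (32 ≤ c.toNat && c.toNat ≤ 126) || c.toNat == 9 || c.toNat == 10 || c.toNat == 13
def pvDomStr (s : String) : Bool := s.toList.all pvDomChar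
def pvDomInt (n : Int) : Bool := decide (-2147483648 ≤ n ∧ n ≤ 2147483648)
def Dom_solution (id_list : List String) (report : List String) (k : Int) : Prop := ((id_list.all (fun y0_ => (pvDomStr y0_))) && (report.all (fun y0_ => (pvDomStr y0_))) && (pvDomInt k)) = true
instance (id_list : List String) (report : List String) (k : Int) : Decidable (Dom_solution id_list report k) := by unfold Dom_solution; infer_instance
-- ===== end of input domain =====

-- B is an alternative exact algorithm: a deduplicated set of (reporter, reported) pairs replaces
-- A's dict-of-sets keyed by reporter and its flattening count pass. Return-value equivalence only.

-- ===== PORT A =====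
-- first loop: build reporting_user : reporter -> set of reported ids
def ruStep (d : PySem.Dict String (PySem.Set String)) (line : String) : PySem.Dict String (PySem.Set String) :=
  match PySem.Str.split₀ line with
  | [uid, reported_id] =>
      if d.contains uid = false then d.insert uid (PySem.Set.ofList [reported_id])
      else d.modify uid PySem.Set.empty (fun s => PySem.Set.add s reported_id)
  | _ => d  -- Python raises ValueError here (unpacking); excluded by Pre_solution

-- second loop: count, per reported id, how many reporters' sets mention it
def rcStep (rc : PySem.Dict String Int) (us : String × PySem.Set String) : PySem.Dict String Int :=
  us.2.foldl (fun rc reported_id =>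
    if rc.contains reported_id = false then rc.insert reported_id 1
    else rc.modify reported_id 0 (· + 1)) rc

def solution (id_list : List String) (report : List String) (k : Int) : List Int :=
  let reporting_user := report.foldl ruStep PySem.Dict.empty
  let reported_count := reporting_user.items.foldl rcStep PySem.Dict.empty
  id_list.map (fun uid =>
    if reporting_user.contains uid = false then 0
    else (reporting_user.getD uid PySem.Set.empty).foldl (fun a reported_id =>
      if reported_count.contains reported_id && decide (k ≤ reported_count.getD reported_id 0)
      then a + 1 else a) 0)

-- ===== PORT B =====
def pairStep (p : PySem.Set (String × String)) (line : String) : PySem.Set (String × String) :=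
  match PySem.Str.split₀ line with
  | [uid, reported_id] => PySem.Set.add p (uid, reported_id)
  | _ => p  -- Python raises ValueError here (unpacking); excluded by Pre_solution

def solution_alt (id_list : List String) (report : List String) (k : Int) : List Int :=
  let pairs := report.foldl pairStep PySem.Set.empty
  let cnt : PySem.Dict String Int :=
    pairs.foldl (fun d pr => d.modify pr.2 0 (· + 1)) PySem.Dict.empty
  id_list.map (fun uid =>
    ((pairs.countP (fun pr => pr.1 == uid && decide (k ≤ cnt.getD pr.2 0)) : Nat) : Int))

-- ===== PRECONDITION & SPEC =====
-- Pre_ excludes report lines that do not split into exactly two words: there Python A raises ValueError.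
def Pre_solution (id_list : List String) (report : List String) (k : Int) : Prop :=
  ∀ line ∈ report, (PySem.Str.split₀ line).length = 2
instance (id_list : List String) (report : List String) (k : Int) : Decidable (Pre_solution id_list report k) := by unfold Pre_solution; infer_instance

def pvWitness_solution : List String × List String × Int := (["muzi", "frodo"], ["muzi frodo", "apeach frodo"], 2)

def Spec_solution (id_list : List String) (report : List String) (k : Int) (out : List Int) : Prop := out = solution_alt id_list report k
instance (id_list : List String) (report : List String) (k : Int) (out : List Int) : Decidable (Spec_solution id_list report k out) := by unfold Spec_solution; infer_instance

-- ===== CLAIM (what is proved, stated in full; the proofs are below) =====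
def Claim_equal_solution : Prop := ∀ (id_list : List String) (report : List String) (k : Int), Dom_solution id_list report k → Pre_solution id_list report k → Spec_solution id_list report k (solution id_list report k)

-- ===== LEMMAS AND PROOFS =====

-- the multiset of (reporter, reported) pairs stored in A's dict-of-sets
def flatPairs (d : PySem.Dict String (PySem.Set String)) : List (String × String) :=
  d.items.flatMap (fun us => us.2.map (fun r => (us.1, r)))

-- invariant tying A's first-loop state to B's pair set
def RInv (d : PySem.Dict String (PySem.Set String)) (p : List (String × String)) : Prop :=
  d.keys.Nodup ∧ (∀ us ∈ d.items, us.2.Nodup) ∧ (flatPairs d).Perm p ∧ p.Nodup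

theorem mem_flatPairs (d : PySem.Dict String (PySem.Set String)) (a b : String) :
    (a, b) ∈ flatPairs d ↔ ∃ s, (a, s) ∈ d.items ∧ b ∈ s := by
  simp only [flatPairs, List.mem_flatMap, List.mem_map, Prod.mk.injEq]
  constructor
  · rintro ⟨us, hus, r, hr, rfl, rfl⟩; exact ⟨us.2, hus, hr⟩
  · rintro ⟨s, hs, hb⟩; exact ⟨(a, s), hs, b, hb, rfl, rfl⟩

theorem keys_of_mem_flatPairs (d : PySem.Dict String (PySem.Set String)) {a b : String}
    (h : (a, b) ∈ flatPairs d) : a ∈ d.keys := by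
  obtain ⟨s, hs, -⟩ := (mem_flatPairs d a b).mp h
  exact PySem.Dict.mem_keys_of_mem_items d hs

theorem mem_flatPairs_iff_getD (d : PySem.Dict String (PySem.Set String)) (hk : d.keys.Nodup)
    {a : String} (ha : d.contains a = true) (b : String) :
    (a, b) ∈ flatPairs d ↔ b ∈ d.getD a PySem.Set.empty := by
  rw [mem_flatPairs]
  constructor
  · rintro ⟨s, hs, hb⟩
    rw [PySem.Dict.getD_of_mem_items d hs hk]; exact hb
  · intro hb
    obtain ⟨a', ha'⟩ := List.mem_map.mp ((PySem.Dict.contains_iff_mem_keys d a).mp ha)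
    have hmem : (a, a'.2) ∈ d.items := by rw [← ha'.2]; exact ha'.1
    refine ⟨a'.2, hmem, ?_⟩
    rwa [PySem.Dict.getD_of_mem_items d hmem hk PySem.Set.empty] at hb

theorem set_add_of_mem {α : Type} [BEq α] [LawfulBEq α] (s : PySem.Set α) {x : α} (h : x ∈ s) :
    PySem.Set.add s x = s := by
  simp [PySem.Set.add, h]

theorem set_add_of_not_mem {α : Type} [BEq α] [LawfulBEq α] (s : PySem.Set α) {x : α} (h : x ∉ s) :
    PySem.Set.add s x = s ++ [x] := by
  simp [PySem.Set.add, h]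

theorem inv_step (d : PySem.Dict String (PySem.Set String)) (p : List (String × String))
    (line : String) (h : RInv d p) : RInv (ruStep d line) (pairStep p line) := by
  obtain ⟨hk, hv, hperm, hnd⟩ := h
  unfold ruStep pairStep
  cases hsp : PySem.Str.split₀ line with
  | nil => exact ⟨hk, hv, hperm, hnd⟩
  | cons u t =>
    cases t with
    | nil => exact ⟨hk, hv, hperm, hnd⟩
    | cons r t2 =>
      cases t2 with
      | cons _ _ => exact ⟨hk, hv, hperm, hnd⟩
      | nil =>
        by_cases hc : d.contains u = false
        · -- fresh reporter: both sides append
          simp only [hc, if_true]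
          have hnotin : (u, r) ∉ p := by
            intro hin
            have := keys_of_mem_flatPairs d (hperm.mem_iff.mpr hin)
            rw [← PySem.Dict.contains_iff_mem_keys] at this
            rw [hc] at this; exact Bool.false_ne_true this
          have hof : PySem.Set.ofList [r] = [r] := rfl
          have hitems : (d.insert u (PySem.Set.ofList [r])).items = d.items ++ [(u, PySem.Set.ofList [r])] :=
            PySem.Dict.items_insert_of_not_contains d _ hc
          refine ⟨PySem.Dict.nodup_keys_insert d u _ hk, ?_, ?_, ?_⟩
          · intro us hus
            rw [hitems, List.mem_append] at hus
            rcases hus with hus | hus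
            · exact hv us hus
            · simp at hus; rw [hus, hof]; exact List.nodup_singleton r
          · rw [set_add_of_not_mem p hnotin]
            have : flatPairs (d.insert u (PySem.Set.ofList [r])) = flatPairs d ++ [(u, r)] := by
              rw [flatPairs, hitems, List.flatMap_append, hof]
              simp [flatPairs]
            rw [this]
            exact hperm.append_right [(u, r)]
          · rw [set_add_of_not_mem p hnotin]
            refine List.Nodup.append hnd (List.nodup_singleton _) ?_
            intro x hx hx'
            rw [List.mem_singleton] at hx'
            subst hx'; exact hnotin hx
        · -- known reporter: dict set gets the new reported id (or nothing)
          rw [Bool.not_eq_false] at hc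
          simp only [hc, Bool.true_eq_false, if_false]
          set S := d.getD u PySem.Set.empty with hSdef
          have hmod : d.modify u PySem.Set.empty (fun s => PySem.Set.add s r) = d.insert u (PySem.Set.add S r) := rfl
          obtain ⟨q, hq⟩ := List.mem_map.mp ((PySem.Dict.contains_iff_mem_keys d u).mp hc)
          have hS : (u, S) ∈ d.items := by
            have hq1 : (u, q.2) ∈ d.items := by rw [← hq.2]; exact hq.1
            have := PySem.Dict.getD_of_mem_items d hq1 hk PySem.Set.empty
            rw [hSdef, this]; exact hq1
          have hndS : S.Nodup := hv _ hS
          by_cases hr : r ∈ S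
          · -- duplicate pair: both sides unchanged
            have hSr : PySem.Set.add S r = S := set_add_of_mem S hr
            have hdd : d.insert u (PySem.Set.add S r) = d := by
              apply PySem.Dict.ext
              rw [PySem.Dict.items_insert_of_contains d _ hc]
              have : ∀ q ∈ d.items, (if (q.1 == u) = true then (u, PySem.Set.add S r) else q) = q := by
                intro q hq
                by_cases hqu : q.1 = u
                · have hq' : (u, q.2) ∈ d.items := by rw [← hqu]; exact hq
                  have h2 : d.getD u PySem.Set.empty = q.2 :=
                    PySem.Dict.getD_of_mem_items d hq' hk PySem.Set.empty
                  simp only [hqu, beq_self_eq_true, if_true, hSr]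
                  rw [hSdef, h2, ← hqu]
                · simp [hqu]
              rw [List.map_congr_left this]; simp
            have hpin : (u, r) ∈ p := hperm.mem_iff.mp ((mem_flatPairs_iff_getD d hk hc r).mpr hr)
            rw [hmod, hdd, set_add_of_mem p hpin]
            exact ⟨hk, hv, hperm, hnd⟩
          · -- new pair for a known reporter
            have hSr : PySem.Set.add S r = S ++ [r] := set_add_of_not_mem S hr
            have hnotin : (u, r) ∉ p := by
              intro hin
              exact hr ((mem_flatPairs_iff_getD d hk hc r).mp (hperm.mem_iff.mpr hin))
            rw [hmod, set_add_of_not_mem p hnotin]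
            have hitems : (d.insert u (PySem.Set.add S r)).items =
                d.items.map (fun q => if (q.1 == u) = true then (u, S ++ [r]) else q) := by
              rw [PySem.Dict.items_insert_of_contains d _ hc, hSr]
            have hpl : d.items.Perm ((u, S) :: (d.items.erase (u, S))) := List.perm_cons_erase hS
            have hne : ∀ q ∈ d.items.erase (u, S), q.1 ≠ u := by
              have hknd : (d.items.map Prod.fst).Nodup := hk
              have h2 := (hpl.map Prod.fst).nodup_iff.mp hknd
              simp only [List.map_cons, List.nodup_cons] at h2
              intro q hq hqu
              exact h2.1 (List.mem_map.mpr ⟨q, hq, hqu⟩)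
            refine ⟨PySem.Dict.nodup_keys_insert d u _ hk, ?_, ?_, ?_⟩
            · intro us hus
              rw [hitems] at hus
              obtain ⟨q, hq, hq2⟩ := List.mem_map.mp hus
              by_cases hqu : q.1 = u
              · rw [← hq2]; simp only [hqu, beq_self_eq_true, if_true]
                exact List.Nodup.append hndS (List.nodup_singleton r)
                  (by intro x hx hx'; rw [List.mem_singleton] at hx'; subst hx'; exact hr hx)
              · rw [← hq2, if_neg (by simp [hqu])]
                exact hv q hq
            · -- flatPairs of the updated dict ~ p ++ [(u, r)]
              have step1 : (flatPairs (d.insert u (PySem.Set.add S r))).Perm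
                  ((((u, S) :: d.items.erase (u, S)).map
                    (fun q => if (q.1 == u) = true then (u, S ++ [r]) else q)).flatMap
                    (fun us => us.2.map (fun r => (us.1, r)))) := by
                rw [flatPairs, hitems]
                exact List.Perm.flatMap_right _ (hpl.map _)
              have hmapid : (d.items.erase (u, S)).map
                  (fun q => if (q.1 == u) = true then (u, S ++ [r]) else q) = d.items.erase (u, S) := by
                rw [List.map_congr_left (g := id) ?_, List.map_id]
                intro q hq
                simp [beq_iff_eq, hne q hq]
              have step2 : (((u, S) :: d.items.erase (u, S)).map
                    (fun q => if (q.1 == u) = true then (u, S ++ [r]) else q)).flatMap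
                    (fun us => us.2.map (fun r => (us.1, r))) =
                  (S.map (fun x => (u, x)) ++ [(u, r)]) ++
                    ((d.items.erase (u, S)).flatMap (fun us => us.2.map (fun r => (us.1, r)))) := by
                rw [List.map_cons, hmapid]
                simp
              have step3 : (flatPairs d).Perm
                  ((S.map (fun x => (u, x))) ++
                    ((d.items.erase (u, S)).flatMap (fun us => us.2.map (fun r => (us.1, r))))) := by
                rw [flatPairs]
                have := List.Perm.flatMap_right (fun us : String × PySem.Set String => us.2.map (fun r => (us.1, r))) hpl
                simpa using this
              have habc : ((S.map (fun x => (u, x)) ++ [(u, r)]) ++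
                    ((d.items.erase (u, S)).flatMap (fun us => us.2.map (fun r => (us.1, r))))).Perm
                  ((S.map (fun x => (u, x)) ++
                    ((d.items.erase (u, S)).flatMap (fun us => us.2.map (fun r => (us.1, r))))) ++ [(u, r)]) := by
                rw [List.append_assoc, List.append_assoc]
                exact List.Perm.append_left _ (List.perm_append_comm)
              have step12 : (flatPairs (d.insert u (PySem.Set.add S r))).Perm
                  ((S.map (fun x => (u, x)) ++ [(u, r)]) ++
                    ((d.items.erase (u, S)).flatMap (fun us => us.2.map (fun r => (us.1, r))))) := by
                rw [← step2]; exact step1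
              exact step12.trans (habc.trans ((step3.symm.append_right [(u, r)]).trans (hperm.append_right [(u, r)])))
            · refine List.Nodup.append hnd (List.nodup_singleton _) ?_
              intro x hx hx'
              rw [List.mem_singleton] at hx'
              subst hx'; exact hnotin hx
  
theorem inv_loop (report : List String) (d : PySem.Dict String (PySem.Set String))
    (p : List (String × String)) (h : RInv d p) :
    RInv (report.foldl ruStep d) (report.foldl pairStep p) := by
  induction report generalizing d p with
  | nil => exact h
  | cons line rest ih => exact ih _ _ (inv_step d p line h)

theorem getD_mem_items_of_contains (d : PySem.Dict String (PySem.Set String)) (hk : d.keys.Nodup)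
    {u : String} (hc : d.contains u = true) : (u, d.getD u PySem.Set.empty) ∈ d.items := by
  obtain ⟨q, hq1, hq2⟩ := List.mem_map.mp ((PySem.Dict.contains_iff_mem_keys d u).mp hc)
  have hq' : (u, q.2) ∈ d.items := by rw [← hq2]; exact hq1
  rw [PySem.Dict.getD_of_mem_items d hq' hk PySem.Set.empty]
  exact hq'

-- ===== VERDICT (by name: the statement is the Claim_ definition above) =====
theorem solution_spec : Claim_equal_solution := by
  intro id_list report k _hdom _hpre
  unfold Spec_solution
  simp only [solution, solution_alt]
  have hbase : RInv PySem.Dict.empty PySem.Set.empty := by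
    refine ⟨?_, ?_, ?_, ?_⟩
    · rw [PySem.Dict.keys_empty]; exact List.nodup_nil
    · intro us hus; simp [PySem.Dict.empty] at hus
    · exact List.Perm.refl _
    · exact List.nodup_nil
  obtain ⟨hk, hv, hperm, hnd⟩ := inv_loop report PySem.Dict.empty PySem.Set.empty hbase
  set d := report.foldl ruStep PySem.Dict.empty with hd
  set p := report.foldl pairStep PySem.Set.empty with hp
  have hbody : ∀ (rc : PySem.Dict String Int) (x : String),
      (if rc.contains x = false then rc.insert x 1 else rc.modify x 0 (· + 1)) = rc.modify x 0 (· + 1) := by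
    intro rc x
    by_cases hcx : rc.contains x = false
    · rw [if_pos hcx]
      show rc.insert x 1 = rc.insert x ((rc.getD x 0) + 1)
      rw [PySem.Dict.getD_of_not_contains rc 0 hcx]
      norm_num
    · rw [if_neg hcx]
  have hrc : d.items.foldl rcStep PySem.Dict.empty
      = PySem.Dict.counter ((flatPairs d).map Prod.snd) := by
    have hflat : (flatPairs d).map Prod.snd = d.items.flatMap (fun us => us.2) := by
      simp [flatPairs, List.map_flatMap, List.map_map, Function.comp_def]
    rw [hflat, PySem.Dict.counter_eq_foldl, List.foldl_flatMap]
    congr 1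
    funext rc us
    unfold rcStep
    congr 1
    funext a b
    exact hbody a b
  have hcnt : p.foldl (fun dd pr => dd.modify pr.2 0 (· + 1)) PySem.Dict.empty
      = PySem.Dict.counter (p.map Prod.snd) := by
    rw [PySem.Dict.counter_eq_foldl, List.foldl_map]
  rw [hrc, hcnt]
  have hmapperm : ((flatPairs d).map Prod.snd).Perm (p.map Prod.snd) := hperm.map Prod.snd
  refine List.map_congr_left ?_
  intro uid _
  by_cases hc : d.contains uid = false
  · rw [if_pos hc]
    have hz : p.countP
        (fun pr => pr.1 == uid && decide (k ≤ (PySem.Dict.counter (p.map Prod.snd)).getD pr.2 0)) = 0 := by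
      rw [List.countP_eq_zero]
      intro pr hpr
      have hmemf : (pr.1, pr.2) ∈ flatPairs d := hperm.mem_iff.mpr hpr
      have hcon : d.contains pr.1 = true :=
        (PySem.Dict.contains_iff_mem_keys d pr.1).mpr (keys_of_mem_flatPairs d hmemf)
      have hne : pr.1 ≠ uid := by
        rintro rfl
        rw [hcon] at hc
        exact absurd hc (by simp)
      simp [hne]
    rw [hz]
    rfl
  · rw [if_neg (by simp [hc])]
    rw [Bool.not_eq_false] at hc
    set S := d.getD uid PySem.Set.empty with hSdef
    have hS : (uid, S) ∈ d.items := getD_mem_items_of_contains d hk hc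
    rw [PySem.List.foldl_count_if, zero_add]
    have hA : S.countP
          (fun x => (PySem.Dict.counter ((flatPairs d).map Prod.snd)).contains x &&
            decide (k ≤ (PySem.Dict.counter ((flatPairs d).map Prod.snd)).getD x 0))
        = S.countP (fun x => decide (k ≤ ((List.count x (p.map Prod.snd) : Nat) : Int))) := by
      apply List.countP_congr
      intro x hx
      have hxf : (uid, x) ∈ flatPairs d := (mem_flatPairs_iff_getD d hk hc x).mpr hx
      have hxs : x ∈ (flatPairs d).map Prod.snd := List.mem_map.mpr ⟨(uid, x), hxf, rfl⟩
      have hcont : (List.map Prod.snd (flatPairs d)).contains x = true := by simpa using hxs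
      rw [PySem.Dict.contains_counter, PySem.Dict.getD_counter,
        hcont, Bool.true_and, hmapperm.count x]
    have hB : p.countP
          (fun pr => pr.1 == uid && decide (k ≤ (PySem.Dict.counter (p.map Prod.snd)).getD pr.2 0))
        = ((p.filter (fun pr => pr.1 == uid)).map Prod.snd).countP
            (fun x => decide (k ≤ ((List.count x (p.map Prod.snd) : Nat) : Int))) := by
      rw [List.countP_map, List.countP_filter]
      apply List.countP_congr
      intro pr hpr
      simp only [PySem.Dict.getD_counter, Function.comp_def, Bool.and_comm]
    have hndS : S.Nodup := hv _ hS
    have hndT : ((p.filter (fun pr => pr.1 == uid)).map Prod.snd).Nodup := by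
      refine (List.nodup_map_iff_inj_on (hnd.filter _)).mpr ?_
      intro x hx y hy hxy
      have hx1 : x.1 = uid := by simpa using (List.mem_filter.mp hx).2
      have hy1 : y.1 = uid := by simpa using (List.mem_filter.mp hy).2
      exact Prod.ext (by rw [hx1, hy1]) hxy
    have hmemTS : ∀ x, x ∈ S ↔ x ∈ (p.filter (fun pr => pr.1 == uid)).map Prod.snd := by
      intro x
      constructor
      · intro hx
        have hxp : (uid, x) ∈ p := hperm.mem_iff.mp ((mem_flatPairs_iff_getD d hk hc x).mpr hx)
        exact List.mem_map.mpr ⟨(uid, x), List.mem_filter.mpr ⟨hxp, by simp⟩, rfl⟩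
      · intro hx
        obtain ⟨pr, hpr, rfl⟩ := List.mem_map.mp hx
        obtain ⟨hpp, hpe⟩ := List.mem_filter.mp hpr
        have hpe' : pr.1 = uid := by simpa using hpe
        have hmemf : (uid, pr.2) ∈ flatPairs d := hperm.mem_iff.mpr (by rw [← hpe']; exact hpp)
        exact (mem_flatPairs_iff_getD d hk hc pr.2).mp hmemf
    have hpermST := (List.perm_ext_iff_of_nodup hndS hndT).mpr hmemTS
    rw [hA, hB, List.Perm.countP_congr hpermST (fun x _ => rfl)]
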